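-- pv_equiv track=rewrite | github.com/AlexanderLolo/Programming_course | src/8problems_2/problemset_5.py | massdriver
-- ===== SOURCE A (Python) =====
-- def massdriver(activate):
--
--     index = len(activate)
--     dict1 = {}
--
--     for i, element in enumerate(activate):
--
--         if element not in dict1:
--             dict1[element] = i
--
--         elif dict1[element] < index:
--             index = dict1[element]
--
--     if index < len(activate):
--         return index
--     return -1
-- ===== SOURCE B (Python) =====
-- def massdriver(activate):
--     # Two-pass: build a frequency table, then return the index of the first
--     # element that occurs more than once (earliest duplicated position equals
--     # the minimum first-occurrence index among duplicated elements).
--     counts = {}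
--     for x in activate:
--         counts[x] = counts.get(x, 0) + 1
--     for i, x in enumerate(activate):
--         if counts[x] > 1:
--             return i
--     return -1
-- ===== Notes on version B (the rewrite author's own statement) =====
-- stated objective: simpler
-- what changed: Replaces A's single-pass running-minimum over a first-occurrence dict by a two-pass scheme: build a full frequency table, then scan once and return early at the first index whose element occurs more than once (which equals A's minimum first-occurrence index among duplicates).
import Mathlib
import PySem

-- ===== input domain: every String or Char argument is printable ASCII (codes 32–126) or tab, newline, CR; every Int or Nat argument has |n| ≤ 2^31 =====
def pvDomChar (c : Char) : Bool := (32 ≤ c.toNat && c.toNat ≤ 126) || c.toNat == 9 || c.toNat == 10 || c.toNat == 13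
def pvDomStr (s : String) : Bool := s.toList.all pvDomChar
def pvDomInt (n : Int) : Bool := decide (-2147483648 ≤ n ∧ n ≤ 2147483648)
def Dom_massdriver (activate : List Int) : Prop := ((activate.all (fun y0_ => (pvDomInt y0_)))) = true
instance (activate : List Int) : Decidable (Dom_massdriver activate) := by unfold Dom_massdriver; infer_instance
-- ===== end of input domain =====

-- B replaces A's running-minimum over a first-occurrence dict by a frequency table
-- plus an early-returning scan for the first duplicated position (objective: simpler).


-- ===== PORT A =====
-- the loop body: `if element not in dict1: dict1[element] = i  elif dict1[element] < index: index = dict1[element]`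
-- (`dict1[element]` is ported as getD _ 0; it is only reached when the key is present, so this is exact)
def massdriverStep (s : Int × PySem.Dict Int Int) (p : Int × Int) : Int × PySem.Dict Int Int :=
  if s.2.contains p.2 = false then (s.1, s.2.insert p.2 p.1)
  else if s.2.getD p.2 0 < s.1 then (s.2.getD p.2 0, s.2)
  else s

def massdriver (activate : List Int) : Int :=
  let n : Int := activate.length
  let st := (PySem.List.enumerate activate 0).foldl massdriverStep (n, PySem.Dict.empty)
  if st.1 < n then st.1 else -1

-- ===== PORT B =====
-- first pass: counts[x] = counts.get(x, 0) + 1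
def massdriverCounts (activate : List Int) : PySem.Dict Int Int :=
  activate.foldl (fun d x => d.insert x (d.getD x 0 + 1)) PySem.Dict.empty

-- second pass: `for i, x in enumerate(activate): if counts[x] > 1: return i` / `return -1`
def massdriverScan (counts : PySem.Dict Int Int) : List (Int × Int) → Int
  | [] => -1
  | p :: rest => if counts.getD p.2 0 > 1 then p.1 else massdriverScan counts rest

def massdriver_alt (activate : List Int) : Int :=
  massdriverScan (massdriverCounts activate) (PySem.List.enumerate activate 0)

-- ===== PRECONDITION & SPEC =====
def Spec_massdriver (activate : List Int) (out : Int) : Prop := out = massdriver_alt activate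
instance (activate : List Int) (out : Int) : Decidable (Spec_massdriver activate out) := by unfold Spec_massdriver; infer_instance

-- ===== CLAIM (what is proved, stated in full; the proofs are below) =====
def Claim_equal_massdriver : Prop := ∀ (activate : List Int), Dom_massdriver activate → Spec_massdriver activate (massdriver activate)

-- ===== LEMMAS AND PROOFS =====

-- first index (from offset i) of an element of Q satisfying p, as Python's scan computes it
def ffirst (p : Int → Bool) : List Int → Int → Option Int
  | [], _ => none
  | x :: r, i => if p x then some i else ffirst p r (i + 1)

-- min of two optional indices (none = not found)
def omin : Option Int → Option Int → Option Int
  | none, o => o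
  | some a, none => some a
  | some a, some b => some (min a b)

lemma ffirst_bounds (p : Int → Bool) (Q : List Int) (i j : Int)
    (h : ffirst p Q i = some j) : i ≤ j ∧ j < i + Q.length := by
  induction Q generalizing i with
  | nil => simp [ffirst] at h
  | cons x r ih =>
    simp only [ffirst] at h
    split at h
    · cases h
      simp only [List.length_cons]
      push_cast
      omega
    · have := ih (i + 1) h
      simp only [List.length_cons]
      push_cast
      omega

lemma omin_none_left (o : Option Int) : omin none o = o := rfl
lemma omin_some_some (a b : Int) : omin (some a) (some b) = some (min a b) := rfl

lemma omin_some_left (i : Int) (o : Option Int) (h : ∀ b, o = some b → i ≤ b) :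
    omin (some i) o = some i := by
  cases o with
  | none => rfl
  | some b => simp only [omin, Option.some.injEq]; exact min_eq_left (h b rfl)

lemma omin_some_right (i : Int) (o : Option Int) (h : ∀ b, o = some b → i ≤ b) :
    omin o (some i) = some i := by
  cases o with
  | none => rfl
  | some b => simp only [omin, Option.some.injEq]; exact min_eq_right (h b rfl)

lemma ffirst_append_singleton (p : Int → Bool) (Q : List Int) (y : Int) (i : Int) :
    ffirst p (Q ++ [y]) i
      = (ffirst p Q i).or (if p y then some (i + Q.length) else none) := by
  induction Q generalizing i with
  | nil => simp [ffirst, Option.or]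
  | cons x r ih =>
    simp only [List.cons_append, ffirst]
    split
    · simp [Option.or]
    · rw [ih]
      simp only [List.length_cons]
      congr 2
      simp only [Option.some.injEq]
      push_cast
      omega

lemma ffirst_congr (p q : Int → Bool) (Q : List Int) (h : ∀ x ∈ Q, p x = q x) (i : Int) :
    ffirst p Q i = ffirst q Q i := by
  induction Q generalizing i with
  | nil => rfl
  | cons x r ih =>
    simp only [ffirst, h x (by simp)]
    split
    · rfl
    · exact ih (fun z hz => h z (by simp [hz])) _

lemma ffirst_eq_none (p : Int → Bool) (Q : List Int) (h : ∀ x ∈ Q, p x = false) (i : Int) :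
    ffirst p Q i = none := by
  induction Q generalizing i with
  | nil => rfl
  | cons x r ih => simp [ffirst, h x (by simp), ih (fun z hz => h z (by simp [hz]))]

lemma ffirst_some_of_mem (p : Int → Bool) (Q : List Int) (y : Int)
    (hy : y ∈ Q) (hp : p y = true) (i : Int) : ∃ j, ffirst p Q i = some j := by
  induction Q generalizing i with
  | nil => simp at hy
  | cons x r ih =>
    simp only [ffirst]
    split
    · exact ⟨i, rfl⟩
    · rcases List.mem_cons.mp hy with h | h
      · subst h; simp_all
      · exact ih h (i + 1)

lemma ffirst_union (p q p' : Int → Bool) (Q : List Int)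
    (h : ∀ x ∈ Q, p' x = (p x || q x)) (i : Int) :
    ffirst p' Q i = omin (ffirst p Q i) (ffirst q Q i) := by
  induction Q generalizing i with
  | nil => rfl
  | cons x r ih =>
    have hx := h x (by simp)
    have ihr := ih (fun z hz => h z (by simp [hz])) (i + 1)
    simp only [ffirst, hx]
    by_cases hp : p x = true
    · simp only [hp, Bool.true_or, if_true]
      exact (omin_some_left i _ (fun b hb => by
        split at hb
        · cases hb; exact le_refl _
        · exact le_of_lt (by have := ffirst_bounds q r (i + 1) b hb; omega))).symm
    · simp only [Bool.not_eq_true] at hp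
      simp only [hp, Bool.false_or]
      by_cases hq : q x = true
      · simp only [hq, if_true]
        exact (omin_some_right i _ (fun b hb => by
          have := ffirst_bounds p r (i + 1) b hb; omega)).symm
      · simp only [Bool.not_eq_true] at hq
        simp only [hq]
        exact ihr

lemma enumerate_append_singleton (xs : List Int) (y : Int) (s : Int) :
    PySem.List.enumerate (xs ++ [y]) s
      = PySem.List.enumerate xs s ++ [(s + xs.length, y)] := by
  induction xs generalizing s with
  | nil => simp [PySem.List.enumerate_nil, PySem.List.enumerate_cons]
  | cons x r ih =>
    simp only [List.cons_append, PySem.List.enumerate_cons, ih (s + 1), List.length_cons]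
    congr 2
    simp only [List.cons.injEq, Prod.mk.injEq, and_true]
    push_cast
    omega

-- state of A's fold over a prefix P (with fixed initial value n ≥ |P|)
lemma foldA (n : Int) (P : List Int) (hn : (P.length : Int) ≤ n) :
    ((PySem.List.enumerate P 0).foldl massdriverStep (n, PySem.Dict.empty)).1
        = (ffirst (fun x => decide (P.count x > 1)) P 0).getD n
    ∧ ∀ z, ((PySem.List.enumerate P 0).foldl massdriverStep (n, PySem.Dict.empty)).2.get? z
        = ffirst (fun x => decide (x = z)) P 0 := by
  induction P using List.reverseRecOn with
  | nil =>
    constructor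
    · simp [PySem.List.enumerate_nil, ffirst]
    · intro z; simp [PySem.List.enumerate_nil, ffirst, PySem.Dict.get?_empty]
  | append_singleton P y ih =>
    have hP : (P.length : Int) ≤ n := by
      simp only [List.length_append, List.length_cons, List.length_nil] at hn
      push_cast at hn ⊢; omega
    have hn1 : (P.length : Int) + 1 ≤ n := by
      simp only [List.length_append, List.length_cons, List.length_nil] at hn
      push_cast at hn; omega
    obtain ⟨h1, h2⟩ := ih hP
    rw [enumerate_append_singleton, List.foldl_append]
    set st := (PySem.List.enumerate P 0).foldl massdriverStep (n, PySem.Dict.empty) with hst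
    simp only [List.foldl_cons, List.foldl_nil]
    by_cases hyP : y ∈ P
    · -- y already seen: dict unchanged, index = min with first occurrence of y
      obtain ⟨f, hf⟩ := ffirst_some_of_mem (fun x => decide (x = y)) P y hyP (by simp) 0
      have hfb := ffirst_bounds _ _ _ _ hf
      have hcont : st.2.contains y = true := by
        rw [PySem.Dict.contains_eq_isSome_get?, h2 y, hf]; rfl
      have hgetD : st.2.getD y 0 = f := by
        rw [PySem.Dict.getD_eq_get?_getD, h2 y, hf]; rfl
      have hcount : 1 ≤ P.count y := List.one_le_count_iff.mpr hyP
      have hunion : ffirst (fun x => decide ((P ++ [y]).count x > 1)) P 0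
          = omin (ffirst (fun x => decide (P.count x > 1)) P 0)
                 (ffirst (fun x => decide (x = y)) P 0) := by
        apply ffirst_union
        intro x hx
        simp only [List.count_append, List.count_singleton']
        by_cases hxy : x = y
        · subst hxy
          have : P.count x + 1 > 1 := by omega
          simp [this]
        · rw [if_neg (fun h : y = x => hxy h.symm)]
          simp [hxy]
      constructor
      · -- index component
        have hc1 : (P ++ [y]).count y = P.count y + 1 := by simp
        have hcy : (decide ((P ++ [y]).count y > 1)) = true := by
          simp only [decide_eq_true_eq, hc1]
          omega
        have hstep1 : (massdriverStep st ((0 : Int) + P.length, y)).1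
            = if f < st.1 then f else st.1 := by
          by_cases hlt : f < st.1 <;>
            simp [massdriverStep, hcont, hgetD, hlt]
        rw [ffirst_append_singleton, hunion, hf, hcy, if_pos rfl, hstep1, h1]
        cases hpp : ffirst (fun x => decide (P.count x > 1)) P 0 with
        | none =>
          simp only [omin_none_left, Option.some_or, Option.getD_none, Option.getD_some]
          rw [if_pos (by omega)]
        | some m =>
          simp only [omin_some_some, Option.some_or, Option.getD_some]
          rcases lt_or_ge f m with hlt | hge
          · rw [if_pos hlt, min_eq_right (le_of_lt hlt)]
          · rw [if_neg (not_lt.mpr hge), min_eq_left hge]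
      · -- dict component: unchanged
        intro z
        have hd2 : (massdriverStep st ((0 : Int) + P.length, y)).2 = st.2 := by
          by_cases hlt : st.2.getD y 0 < st.1 <;> simp [massdriverStep, hcont, hlt]
        rw [hd2, h2 z, ffirst_append_singleton]
        by_cases hzy : y = z
        · subst hzy
          rw [hf]
          simp
        · simp [hzy]
    · -- y fresh: inserted into dict, index unchanged
      have hnone : ffirst (fun x => decide (x = y)) P 0 = none := by
        apply ffirst_eq_none
        intro x hx
        simp only [decide_eq_false_iff_not]
        rintro rfl; exact hyP hx
      have hcont : st.2.contains y = false := by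
        rw [PySem.Dict.contains_eq_isSome_get?, h2 y, hnone]; rfl
      have hstep : massdriverStep st ((0 : Int) + P.length, y)
          = (st.1, st.2.insert y ((0 : Int) + P.length)) := by
        simp [massdriverStep, hcont]
      rw [hstep]
      constructor
      · rw [ffirst_append_singleton]
        have hc1 : (P ++ [y]).count y = P.count y + 1 := by simp
        have hcy : decide ((P ++ [y]).count y > 1) = false := by
          simp only [decide_eq_false_iff_not, hc1]
          have : P.count y = 0 := List.count_eq_zero.mpr hyP
          omega
        rw [hcy, if_neg (by simp), Option.or_none]
        rw [h1]
        congr 1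
        apply ffirst_congr
        intro x hx
        have hxy : y ≠ x := by rintro rfl; exact hyP hx
        simp [List.count_append, hxy]
      · intro z
        rw [ffirst_append_singleton]
        by_cases hzy : z = y
        · subst hzy
          rw [PySem.Dict.get?_insert_self, hnone]
          simp
        · rw [PySem.Dict.get?_insert_of_ne _ _ hzy, h2 z]
          simp [Ne.symm hzy]

lemma scanB (full : List Int) (c : PySem.Dict Int Int)
    (hc : ∀ z, c.getD z 0 = (full.count z : Int)) (l : List Int) (i : Int) :
    massdriverScan c (PySem.List.enumerate l i)
      = (ffirst (fun x => decide (full.count x > 1)) l i).getD (-1) := by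
  induction l generalizing i with
  | nil => simp [PySem.List.enumerate_nil, massdriverScan, ffirst]
  | cons x r ih =>
    rw [PySem.List.enumerate_cons]
    simp only [massdriverScan, ffirst, hc x]
    by_cases h : 1 < full.count x
    · have h' : (1 : Int) < (full.count x : Int) := by exact_mod_cast h
      simp [h, h']
    · have h' : ¬ (1 : Int) < (full.count x : Int) := by exact_mod_cast h
      simp [h, h', ih]

lemma counts_spec (activate : List Int) (z : Int) :
    (massdriverCounts activate).getD z 0 = (activate.count z : Int) := by
  unfold massdriverCounts
  rw [PySem.Dict.getD_foldl_insert_add_one]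
  simp [PySem.Dict.getD_empty]

-- ===== VERDICT (by name: the statement is the Claim_ definition above) =====
theorem massdriver_spec : Claim_equal_massdriver := by
  intro activate _
  simp only [Spec_massdriver, massdriver, massdriver_alt]
  obtain ⟨h1, _⟩ := foldA (activate.length : Int) activate (le_refl _)
  rw [h1, scanB activate _ (counts_spec activate) activate 0]
  cases hF : ffirst (fun x => decide (activate.count x > 1)) activate 0 with
  | none => simp
  | some j =>
    have := ffirst_bounds _ _ _ _ hF
    simp only [Option.getD_some]
    rw [if_pos (by omega)]
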